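-- pv_equiv track=rewrite | github.com/GunsRoseSS/BD02 | main.py | WeightSort
-- ===== SOURCE A (Python) =====
-- def WeightSort(A, balance1, balance2):
--     if len(A) == 0:
--         return "Weegschaal 1: " + str(balance1) + " Weegschaal 2: " + str(balance2)
--     else:
--         A.sort()
--         selectedweight = A.pop()
--         if balance1 < balance2:
--             balance1 += selectedweight
--         else:
--             balance2 += selectedweight
--         return WeightSort(A, balance1, balance2)
-- ===== SOURCE B (Python) =====
-- def WeightSort(A, balance1, balance2):
--     b1, b2 = balance1, balance2
--     for w in sorted(A, reverse=True):
--         if b1 < b2: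
--             b1 += w
--         else:
--             b2 += w
--     return "Weegschaal 1: " + str(b1) + " Weegschaal 2: " + str(b2)
-- ===== Notes on version B (the rewrite author's own statement) =====
-- stated objective: faster
-- what changed: Replaces the recursion that re-sorts the whole list and pops the maximum on every step with a single descending sort followed by one accumulating pass; B does not mutate its argument (A sorts and empties the list in place).
import Mathlib
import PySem

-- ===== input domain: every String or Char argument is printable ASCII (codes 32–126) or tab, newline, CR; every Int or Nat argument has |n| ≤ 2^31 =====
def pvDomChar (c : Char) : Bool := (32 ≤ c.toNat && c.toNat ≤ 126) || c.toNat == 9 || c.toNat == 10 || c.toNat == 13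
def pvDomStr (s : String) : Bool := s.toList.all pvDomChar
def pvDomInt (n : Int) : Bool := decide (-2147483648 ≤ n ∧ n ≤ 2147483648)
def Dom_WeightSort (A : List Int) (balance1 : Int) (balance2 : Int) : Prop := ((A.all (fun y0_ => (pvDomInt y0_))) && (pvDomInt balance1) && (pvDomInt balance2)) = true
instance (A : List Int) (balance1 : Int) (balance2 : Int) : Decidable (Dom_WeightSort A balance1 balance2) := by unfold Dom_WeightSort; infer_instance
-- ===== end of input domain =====

-- B replaces A's re-sort-and-pop recursion by one descending sort plus a single
-- accumulating pass (asymptotically faster); equivalence is about the RETURN value only: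
-- the Python A sorts and empties its list argument in place, B does not mutate it.

-- ===== PORT A =====
-- A re-sorts the (remaining) list on every recursive call and pops its last element.
def WeightSort (A : List Int) (balance1 : Int) (balance2 : Int) : String :=
  if A.length = 0 then
    "Weegschaal 1: " ++ PySem.Int.toStr balance1 ++ " Weegschaal 2: " ++ PySem.Int.toStr balance2
  else
    match h : PySem.List.pop? (PySem.List.sorted A (fun x => x)) with
    | none => ""  -- unreachable: s is nonempty, so A.pop() succeeds
    | some r =>
      let selectedweight := r.1
      if balance1 < balance2 then
        WeightSort r.2 (balance1 + selectedweight) balance2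
      else
        WeightSort r.2 balance1 (balance2 + selectedweight)
termination_by A.length
decreasing_by
  all_goals
    have h1 := PySem.List.length_of_pop?_eq_some _ h
    have h2 := PySem.List.length_sorted A (fun x : Int => x) false
    omega

-- ===== PORT B =====
-- one step of B's loop: add w to the lighter balance
def wstep (p : Int × Int) (w : Int) : Int × Int :=
  if p.1 < p.2 then (p.1 + w, p.2) else (p.1, p.2 + w)

def WeightSort_alt (A : List Int) (balance1 : Int) (balance2 : Int) : String :=
  let p := (PySem.List.sorted A (fun x => x) true).foldl wstep (balance1, balance2)
  "Weegschaal 1: " ++ PySem.Int.toStr p.1 ++ " Weegschaal 2: " ++ PySem.Int.toStr p.2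

-- ===== PRECONDITION & SPEC =====
def Spec_WeightSort (A : List Int) (balance1 : Int) (balance2 : Int) (out : String) : Prop := out = WeightSort_alt A balance1 balance2
instance (A : List Int) (balance1 : Int) (balance2 : Int) (out : String) : Decidable (Spec_WeightSort A balance1 balance2 out) := by unfold Spec_WeightSort; infer_instance

-- ===== CLAIM (what is proved, stated in full; the proofs are below) =====
def Claim_equal_WeightSort : Prop := ∀ (A : List Int) (balance1 : Int) (balance2 : Int), Dom_WeightSort A balance1 balance2 → Spec_WeightSort A balance1 balance2 (WeightSort A balance1 balance2)

-- ===== LEMMAS AND PROOFS =====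

-- sorted(xs, reverse=True) on Int is the reverse of sorted(xs)
theorem sorted_id_true_eq_reverse (xs : List Int) :
    PySem.List.sorted xs (fun x => x) true = (PySem.List.sorted xs (fun x => x)).reverse := by
  apply List.eq_of_perm_of_sorted (le := fun a b : Int => b ≤ a)
  · intro a b _ _ h1 h2; omega
  · exact PySem.List.sorted_pairwise_rev xs (fun x => x)
  · rw [List.pairwise_reverse]
    exact PySem.List.sorted_pairwise xs (fun x => x)
  · exact (PySem.List.sorted_perm xs (fun x => x) true).trans
      ((List.reverse_perm _).trans (PySem.List.sorted_perm xs (fun x => x) false)).symm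

-- A equals the single pass over the reversed ascending sort
theorem weightSort_eq_foldl (n : Nat) : ∀ (l : List Int) (b1 b2 : Int), l.length = n →
    WeightSort l b1 b2 =
      (let p := (PySem.List.sorted l (fun x => x)).reverse.foldl wstep (b1, b2)
       "Weegschaal 1: " ++ PySem.Int.toStr p.1 ++ " Weegschaal 2: " ++ PySem.Int.toStr p.2) := by
  induction n using Nat.strong_induction_on with
  | _ n ih =>
    intro l b1 b2 hn
    by_cases hl : l.length = 0
    · have : l = [] := List.length_eq_zero_iff.mp hl
      subst this
      simp [WeightSort, PySem.List.sorted]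
    · -- decompose the sorted list as init ++ [last]
      have hs : PySem.List.sorted l (fun x => x) ≠ [] := by
        intro h
        have := PySem.List.length_sorted l (fun x : Int => x) false
        rw [h] at this; simp at this; omega
      obtain ⟨ys, y, hy⟩ := (List.eq_nil_or_concat _).resolve_left hs
      rw [List.concat_eq_append] at hy
      have hpop : PySem.List.pop? (PySem.List.sorted l (fun x => x)) = some (y, ys) := by
        rw [hy]; exact PySem.List.pop?_last ys y
      -- ys is sorted ascending, so sorting it is the identity
      have hysp : List.Pairwise (fun a b : Int => a ≤ b) ys := by
        have := PySem.List.sorted_pairwise l (fun x : Int => x)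
        rw [hy] at this
        exact (List.pairwise_append.mp this).1
      have hys : PySem.List.sorted ys (fun x => x) = ys :=
        PySem.List.sorted_eq_self_of_pairwise ys (fun x => x) hysp
      have hlen : ys.length < n := by
        have := PySem.List.length_sorted l (fun x : Int => x) false
        rw [hy] at this; simp at this; omega
      have hrev : (PySem.List.sorted l (fun x => x)).reverse = y :: ys.reverse := by
        rw [hy]; simp
      have ihy1 := ih ys.length hlen ys (b1 + y) b2 rfl
      have ihy2 := ih ys.length hlen ys b1 (b2 + y) rfl
      rw [hys] at ihy1 ihy2
      rw [WeightSort]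
      simp only [hl, if_false]
      split
      next hnone => rw [hpop] at hnone; cases hnone
      next r heq =>
        rw [hpop] at heq
        injection heq with heq'
        subst heq'
        by_cases hb : b1 < b2
        · rw [if_pos hb, ihy1, hrev]
          simp only [List.foldl_cons, wstep, if_pos hb]
        · rw [if_neg hb, ihy2, hrev]
          simp only [List.foldl_cons, wstep, if_neg hb]

-- ===== VERDICT (by name: the statement is the Claim_ definition above) =====
theorem WeightSort_spec : Claim_equal_WeightSort := by
  intro A b1 b2 _
  unfold Spec_WeightSort WeightSort_alt
  rw [weightSort_eq_foldl A.length A b1 b2 rfl, sorted_id_true_eq_reverse]
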